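-- pv_equiv track=rewrite | github.com/horacecc/algorithm | LeetCode/3862.py | smallestBalancedIndex
-- ===== SOURCE A (Python) =====
-- def smallestBalancedIndex(nums: list[int]) -> int:
--     n = len(nums)
--     mx = n * max(nums)
--
--
--     r = [1] * (n + 1)
--     for i in range(n - 1, -1, -1):
--         r[i] = r[i + 1] * nums[i]
--         if r[i] > mx:
--             r[i] = mx + 1
--
--     l = 0
--     for i in range(n):
--         if l == r[i + 1]:
--             return i
--         l += nums[i]
--
--     return -1
-- ===== SOURCE B (Python) =====
-- def smallestBalancedIndex(nums: list[int]) -> int: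
--     n = len(nums)
--     mx = n * max(nums)
--     l = 0
--     for i in range(n):
--         p = 1
--         for j in range(n - 1, i, -1):
--             p *= nums[j]
--             if p > mx:
--                 p = mx + 1
--         if l == p:
--             return i
--         l += nums[i]
--     return -1
-- ===== Notes on version B (the rewrite author's own statement) =====
-- stated objective: alternative
-- what changed: Drops the precomputed suffix table r entirely: for each candidate index i, B recomputes the capped suffix product by a fresh right-to-left scan of nums[i+1:], while maintaining the prefix sum incrementally in a single forward loop with early return.
import Mathlib
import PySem

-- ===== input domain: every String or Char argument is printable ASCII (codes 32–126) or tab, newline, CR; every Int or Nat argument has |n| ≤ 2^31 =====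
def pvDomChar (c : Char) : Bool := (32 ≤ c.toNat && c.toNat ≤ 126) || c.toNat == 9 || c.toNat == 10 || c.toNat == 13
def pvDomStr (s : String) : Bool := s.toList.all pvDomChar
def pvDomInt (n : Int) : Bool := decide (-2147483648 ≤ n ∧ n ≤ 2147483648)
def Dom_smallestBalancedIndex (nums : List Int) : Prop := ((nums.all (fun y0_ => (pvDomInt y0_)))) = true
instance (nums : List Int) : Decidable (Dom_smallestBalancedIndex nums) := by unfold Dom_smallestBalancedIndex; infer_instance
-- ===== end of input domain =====

-- B replaces A's precomputed capped suffix-product table by a per-index right-to-left rescan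
-- in a single forward loop (same return value everywhere; alternative decomposition, not faster).

-- ===== PORT A =====
-- forward loop 'for i in range(n): if l == r[i+1]: return i; l += nums[i]' with early return;
-- fuel = number of remaining iterations (= n - i)
def pvAScan (nums r : List Int) (fuel i : Nat) (l : Int) : Int :=
  match fuel with
  | 0 => -1
  | fuel' + 1 =>
    if l = PySem.List.pyGetD r ((i : Int) + 1) 0 then (i : Int)
    else pvAScan nums r fuel' (i + 1) (l + PySem.List.pyGetD nums (i : Int) 0)

def smallestBalancedIndex (nums : List Int) : Int :=
  match PySem.List.max? nums (fun x => x) with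
  | none => 0  -- max([]) raises ValueError; excluded by Pre_
  | some m =>
    let n : Int := (nums.length : Int)
    let mx : Int := n * m
    let r0 : List Int := List.replicate (nums.length + 1) 1
    let r : List Int :=
      (PySem.List.pyRange (n - 1) (-1) (-1)).foldl
        (fun r i =>
          let v : Int := PySem.List.pyGetD r (i + 1) 0 * PySem.List.pyGetD nums i 0
          let v : Int := if v > mx then mx + 1 else v
          PySem.List.pySetD r i v) r0
    pvAScan nums r nums.length 0 0

-- ===== PORT B =====
-- forward loop: per index i a fresh inner scan 'for j in range(n-1, i, -1)' recomputes the
-- capped suffix product; fuel = number of remaining outer iterations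
def pvBScan (nums : List Int) (mx : Int) (fuel i : Nat) (l : Int) : Int :=
  match fuel with
  | 0 => -1
  | fuel' + 1 =>
    let p : Int :=
      (PySem.List.pyRange ((nums.length : Int) - 1) (i : Int) (-1)).foldl
        (fun p j =>
          let p := p * PySem.List.pyGetD nums j 0
          if p > mx then mx + 1 else p) 1
    if l = p then (i : Int)
    else pvBScan nums mx fuel' (i + 1) (l + PySem.List.pyGetD nums (i : Int) 0)

def smallestBalancedIndex_alt (nums : List Int) : Int :=
  match PySem.List.max? nums (fun x => x) with
  | none => 0  -- max([]) raises ValueError; excluded by Pre_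
  | some m => pvBScan nums ((nums.length : Int) * m) nums.length 0 0

-- ===== PRECONDITION & SPEC =====
-- Pre_ excludes only the empty list, on which A raises ValueError (max() of empty sequence).
def Pre_smallestBalancedIndex (nums : List Int) : Prop := nums ≠ []
instance (nums : List Int) : Decidable (Pre_smallestBalancedIndex nums) := by
  unfold Pre_smallestBalancedIndex; infer_instance

def pvWitness_smallestBalancedIndex : List Int := [1, 2, 3]

def Spec_smallestBalancedIndex (nums : List Int) (out : Int) : Prop := out = smallestBalancedIndex_alt nums
instance (nums : List Int) (out : Int) : Decidable (Spec_smallestBalancedIndex nums out) := by unfold Spec_smallestBalancedIndex; infer_instance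

-- ===== CLAIM (what is proved, stated in full; the proofs are below) =====
def Claim_equal_smallestBalancedIndex : Prop := ∀ (nums : List Int), Dom_smallestBalancedIndex nums → Pre_smallestBalancedIndex nums → Spec_smallestBalancedIndex nums (smallestBalancedIndex nums)

-- ===== LEMMAS AND PROOFS =====

-- the capping step, and pvP i = the capped product of nums[i:] processed right to left
def pvCapStep (mx : Int) : Int → Int → Int := fun p x => if p * x > mx then mx + 1 else p * x

def pvP (nums : List Int) (mx : Int) (i : Nat) : Int :=
  ((nums.drop i).reverse).foldl (pvCapStep mx) 1

theorem pvP_ge (nums : List Int) (mx : Int) (i : Nat) (h : nums.length ≤ i) :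
    pvP nums mx i = 1 := by
  simp [pvP, List.drop_eq_nil_of_le h]

theorem pvP_succ (nums : List Int) (mx : Int) (i : Nat) (h : i < nums.length) :
    pvP nums mx i = pvCapStep mx (pvP nums mx (i + 1)) (nums.getD i 0) := by
  rw [pvP, pvP, List.drop_eq_getElem_cons h, List.reverse_cons, List.foldl_append,
    List.foldl_cons, List.foldl_nil, List.getD_eq_getElem nums 0 h]

-- B's inner scan computes pvP (i+1)
theorem pvB_inner (nums : List Int) (mx : Int) (i : Nat) :
    (PySem.List.pyRange ((nums.length : Int) - 1) (i : Int) (-1)).foldl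
        (fun p j =>
          let p := p * PySem.List.pyGetD nums j 0
          if p > mx then mx + 1 else p) 1 = pvP nums mx (i + 1) := by
  have hfun : (fun (p j : Int) =>
          let p' := p * PySem.List.pyGetD nums j 0
          if p' > mx then mx + 1 else p')
      = fun (p j : Int) => pvCapStep mx p (PySem.List.pyGetD nums j 0) := rfl
  rw [hfun, PySem.List.pyRange_neg_one_eq_reverse]
  have h1 : ((nums.length : Int) - 1) + 1 = (nums.length : Int) := by ring
  rw [h1, ← List.foldl_map (f := fun j => PySem.List.pyGetD nums j 0) (g := pvCapStep mx),
    List.map_reverse, PySem.List.map_pyGetD_pyRange' nums 0 (a := (i : Int) + 1) (by positivity)]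
  have h2 : ((i : Int) + 1).toNat = i + 1 := by omega
  rw [h2]
  rfl

-- A's table-building loop: after processing indices n-1 .. c, entry k is 1 for k < c and pvP k for k ≥ c
theorem pvA_build (nums : List Int) (mx : Int) :
    ∀ (d c : Nat), c ≤ nums.length → nums.length - c = d →
    (PySem.List.pyRange ((nums.length : Int) - 1) ((c : Int) - 1) (-1)).foldl
        (fun r i =>
          let v : Int := PySem.List.pyGetD r (i + 1) 0 * PySem.List.pyGetD nums i 0
          let v : Int := if v > mx then mx + 1 else v
          PySem.List.pySetD r i v) (List.replicate (nums.length + 1) 1)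
      = (List.range (nums.length + 1)).map (fun k => if k < c then (1 : Int) else pvP nums mx k) := by
  intro d
  induction d with
  | zero =>
    intro c hc hd
    have hcn : c = nums.length := by omega
    subst hcn
    rw [PySem.List.pyRange_neg_one_eq_nil (le_refl _), List.foldl_nil]
    apply List.ext_getElem
    · simp
    · intro k h1 h2
      simp only [List.getElem_replicate, List.getElem_map, List.getElem_range]
      by_cases hk : k < nums.length
      · simp [hk]
      · have hge : nums.length ≤ k := Nat.le_of_not_lt hk
        simp [hk, pvP_ge nums mx k hge]
  | succ d ih =>
    intro c hc hd
    have hclt : c < nums.length := by omega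
    have hsplit : PySem.List.pyRange ((nums.length : Int) - 1) ((c : Int) - 1) (-1)
        = PySem.List.pyRange ((nums.length : Int) - 1) (c : Int) (-1) ++ [(c : Int)] := by
      rw [PySem.List.pyRange_neg_one_eq_reverse, PySem.List.pyRange_neg_one_eq_reverse]
      have e1 : ((c : Int) - 1) + 1 = (c : Int) := by ring
      have e2 : ((nums.length : Int) - 1) + 1 = (nums.length : Int) := by ring
      rw [e1, e2, PySem.List.pyRange_one_cons (by exact_mod_cast hclt), List.reverse_cons]
    have ihc := ih (c + 1) (by omega) (by omega)
    have e3 : (((c + 1 : Nat)) : Int) - 1 = (c : Int) := by push_cast; ring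
    rw [e3] at ihc
    rw [hsplit, List.foldl_append, ihc, List.foldl_cons, List.foldl_nil]
    have hget1 : PySem.List.pyGetD
        ((List.range (nums.length + 1)).map (fun k => if k < c + 1 then (1 : Int) else pvP nums mx k))
        ((c : Int) + 1) 0 = pvP nums mx (c + 1) := by
      have e4 : ((c : Int) + 1) = (((c + 1 : Nat)) : Int) := by push_cast; ring
      rw [e4, PySem.List.pyGetD_natCast, PySem.List.getD_map_range _ _ _ _ (by omega)]
      simp
    have hget2 : PySem.List.pyGetD nums (c : Int) 0 = nums.getD c 0 :=
      PySem.List.pyGetD_natCast nums c 0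
    show PySem.List.pySetD _ (c : Int)
        (if PySem.List.pyGetD _ ((c : Int) + 1) 0 * PySem.List.pyGetD nums (c : Int) 0 > mx
          then mx + 1
          else PySem.List.pyGetD _ ((c : Int) + 1) 0 * PySem.List.pyGetD nums (c : Int) 0) = _
    rw [hget1, hget2]
    have hcap : (if pvP nums mx (c + 1) * nums.getD c 0 > mx then mx + 1
        else pvP nums mx (c + 1) * nums.getD c 0) = pvP nums mx c := (pvP_succ nums mx c hclt).symm
    rw [hcap, PySem.List.pySetD_natCast]
    apply List.ext_getElem
    · simp
    · intro k h1 h2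
      rw [List.getElem_set]
      simp only [List.getElem_map, List.getElem_range]
      by_cases hkc : c = k
      · subst hkc
        simp
      · rw [if_neg hkc]
        by_cases hlt : k < c
        · have hlt1 : k < c + 1 := by omega
          simp [hlt, hlt1]
        · have hlt1 : ¬ k < c + 1 := by omega
          simp [hlt, hlt1]

-- with the table replaced by its characterisation, A's forward scan is B's forward scan
theorem pvScan_eq (nums : List Int) (mx : Int) :
    ∀ (fuel i : Nat) (l : Int), i + fuel = nums.length →
    pvAScan nums ((List.range (nums.length + 1)).map (fun k => pvP nums mx k)) fuel i l
      = pvBScan nums mx fuel i l := by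
  intro fuel
  induction fuel with
  | zero => intro i l _; rfl
  | succ f ihf =>
    intro i l hf
    rw [pvAScan, pvBScan]
    have hgetA : PySem.List.pyGetD ((List.range (nums.length + 1)).map (fun k => pvP nums mx k))
        ((i : Int) + 1) 0 = pvP nums mx (i + 1) := by
      have e4 : ((i : Int) + 1) = (((i + 1 : Nat)) : Int) := by push_cast; ring
      rw [e4, PySem.List.pyGetD_natCast, PySem.List.getD_map_range _ _ _ _ (by omega)]
    rw [hgetA]
    show _ = (if l = (PySem.List.pyRange ((nums.length : Int) - 1) (i : Int) (-1)).foldl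
        (fun p j =>
          let p := p * PySem.List.pyGetD nums j 0
          if p > mx then mx + 1 else p) 1 then (i : Int)
      else pvBScan nums mx f (i + 1) (l + PySem.List.pyGetD nums (i : Int) 0))
    rw [pvB_inner]
    by_cases hl : l = pvP nums mx (i + 1)
    · simp [hl]
    · rw [if_neg hl, if_neg hl]
      exact ihf (i + 1) (l + PySem.List.pyGetD nums (i : Int) 0) (by omega)

-- ===== VERDICT (by name: the statement is the Claim_ definition above) =====
theorem smallestBalancedIndex_spec : Claim_equal_smallestBalancedIndex := by
  intro nums _ hne
  obtain ⟨m, hmax⟩ : ∃ m, PySem.List.max? nums (fun x => x) = some m := by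
    cases h' : PySem.List.max? nums (fun x => x) with
    | none => exact absurd ((PySem.List.max?_eq_none_iff nums _).mp h') hne
    | some m => exact ⟨m, rfl⟩
  show smallestBalancedIndex nums = smallestBalancedIndex_alt nums
  rw [smallestBalancedIndex, smallestBalancedIndex_alt, hmax]
  show pvAScan nums
      ((PySem.List.pyRange ((nums.length : Int) - 1) (-1) (-1)).foldl
        (fun r i =>
          let v : Int := PySem.List.pyGetD r (i + 1) 0 * PySem.List.pyGetD nums i 0
          let v : Int := if v > ((nums.length : Int) * m) then ((nums.length : Int) * m) + 1 else v
          PySem.List.pySetD r i v) (List.replicate (nums.length + 1) 1)) nums.length 0 0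
    = pvBScan nums (((nums.length : Int) * m)) nums.length 0 0
  have hb := pvA_build nums (((nums.length : Int) * m)) nums.length 0 (Nat.zero_le _) (by omega)
  have e0 : ((0 : Nat) : Int) - 1 = (-1 : Int) := by norm_num
  rw [e0] at hb
  rw [hb]
  have hmap : (List.range (nums.length + 1)).map
        (fun k => if k < 0 then (1 : Int) else pvP nums (((nums.length : Int) * m)) k)
      = (List.range (nums.length + 1)).map (fun k => pvP nums (((nums.length : Int) * m)) k) := by
    apply List.map_congr_left
    intro k _
    simp
  rw [hmap]
  exact pvScan_eq nums (((nums.length : Int) * m)) nums.length 0 0 (by omega)
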